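-- pv_equiv track=rewrite | github.com/moobeom/Rosalind | Bioinformatics_Algorithms/Chapter9/BA9M.py | BetterBWMatching
-- ===== SOURCE A (Python) =====
-- def CountSymbol(idx,lastCol,sym):
--     return ''.join(c for i,c in lastCol[:idx]).count(sym)
--
-- def BetterBWMatching(FirstOccurrence,lastCol,pattern):
--     top = 0
--     bot = len(lastCol) - 1
--     while top <= bot:
--         if len(pattern) > 0:
--             sym = pattern[-1]
--             pattern = pattern[:-1]
--             l_indices = [i for (i, c) in lastCol[top:bot + 1] if c == sym]
--             if len(l_indices) > 0:
--                 top = FirstOccurrence[sym] + CountSymbol(top, lastCol, sym)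
--                 bot = FirstOccurrence[sym] + CountSymbol(bot + 1, lastCol, sym) - 1
--             else:
--                 return 0
--         else:
--             return bot - top + 1
-- ===== SOURCE B (Python) =====
-- def _prefix_counts(lastCol, s):
--     out = [0]
--     acc = 0
--     for _, c in lastCol:
--         if c == s:
--             acc += 1
--         out.append(acc)
--     return out
--
-- def BetterBWMatching(FirstOccurrence, lastCol, pattern):
--     # Precompute, once per distinct pattern symbol, the prefix-count table
--     # prefix[s][k] = number of occurrences of s among the first k rows of lastCol,
--     # so every narrowing step is O(1) instead of re-scanning the column.
--     prefix = {s: _prefix_counts(lastCol, s) for s in dict.fromkeys(pattern)}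
--     top, bot = 0, len(lastCol) - 1
--     for sym in reversed(pattern):
--         p = prefix[sym]
--         c_top, c_bot = p[top], p[bot + 1]
--         if c_top == c_bot:
--             return 0
--         first = FirstOccurrence[sym]
--         top, bot = first + c_top, first + c_bot - 1
--     return bot - top + 1
-- ===== Notes on version B (the rewrite author's own statement) =====
-- stated objective: alternative
-- what changed: B precomputes, once per distinct pattern symbol, a prefix-count table over the last column, so each narrowing step of the backward search is an O(1) table lookup instead of A's per-step rescan (slice + join + count) of the whole column; on inputs whose pattern symbols are absent from the column both return 0 immediately, so the measured times are similar.
-- outside the precondition, e.g. on BetterBWMatching({}, [], ''): A returns None, B returns 0; on BetterBWMatching({'a': 0}, [(0, 'ba'), (1, 'a')], 'a'): A returns 2, B returns 1; on BetterBWMatching({'a': -1}, [(0, 'a'), (1, 'a')], 'aa'): A returns 0, B returns -1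
import Mathlib
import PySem

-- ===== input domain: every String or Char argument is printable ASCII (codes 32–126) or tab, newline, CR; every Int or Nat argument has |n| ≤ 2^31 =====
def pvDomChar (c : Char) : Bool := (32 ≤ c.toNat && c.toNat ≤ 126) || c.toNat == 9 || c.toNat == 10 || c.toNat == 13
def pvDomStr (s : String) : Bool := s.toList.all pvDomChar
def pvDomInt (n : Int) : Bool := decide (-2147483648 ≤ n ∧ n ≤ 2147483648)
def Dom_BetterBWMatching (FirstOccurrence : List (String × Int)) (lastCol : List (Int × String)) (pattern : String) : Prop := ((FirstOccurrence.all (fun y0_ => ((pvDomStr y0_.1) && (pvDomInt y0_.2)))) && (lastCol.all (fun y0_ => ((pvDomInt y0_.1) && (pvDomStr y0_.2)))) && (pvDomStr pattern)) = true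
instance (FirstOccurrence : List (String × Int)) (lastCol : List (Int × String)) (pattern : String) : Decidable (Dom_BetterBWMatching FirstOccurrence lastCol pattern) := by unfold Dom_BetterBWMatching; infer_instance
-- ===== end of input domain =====

-- B replaces A's per-step rescan of the last column (slice + join + count) by prefix-count
-- tables built once per distinct pattern symbol (one table lookup per narrowing step); objective: alternative.

-- ===== PORT A =====
-- CountSymbol(idx, lastCol, sym) = ''.join(c for i,c in lastCol[:idx]).count(sym)
def CountSymbol (idx : Int) (lastCol : List (Int × String)) (sym : String) : Int :=
  (PySem.Str.count (PySem.Str.join "" ((PySem.List.slice lastCol none (some idx)).map (fun p => p.2))) sym : Int)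

-- A's while loop; ps is the not-yet-consumed pattern reversed (A reads pattern[-1] and drops it)
def BWgoA (FO : List (String × Int)) (lastCol : List (Int × String)) (ps : List Char) (top bot : Int) : Int :=
  if top ≤ bot then
    match ps with
    | sym :: rest =>
      let symS := String.ofList [sym]
      if 0 < ((PySem.List.slice lastCol (some top) (some (bot + 1))).filter (fun p => p.2 == symS)).length then
        match PySem.Dict.get? (PySem.Dict.mk FO) symS with
        | some v => BWgoA FO lastCol rest (v + CountSymbol top lastCol symS)
                      (v + CountSymbol (bot + 1) lastCol symS - 1)
        | none => 0  -- Python raises KeyError here; such inputs are outside Pre_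
      else 0
    | [] => bot - top + 1
  else 0  -- the while loop falls through and Python returns None; such inputs are outside Pre_

def BetterBWMatching (FirstOccurrence : List (String × Int)) (lastCol : List (Int × String)) (pattern : String) : Int :=
  BWgoA FirstOccurrence lastCol pattern.toList.reverse 0 ((lastCol.length : Int) - 1)

-- ===== PORT B =====
-- _prefix_counts: out = [0]; acc = 0; for _, c in lastCol: acc += (c == s); out.append(acc)
def pyPrefixCounts (lastCol : List (Int × String)) (s : String) : List Int :=
  (lastCol.foldl (fun (st : List Int × Int) p =>
      let acc := if p.2 == s then st.2 + 1 else st.2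
      (st.1 ++ [acc], acc)) ([0], 0)).1

-- B's 'for sym in reversed(pattern)' loop
def BWgoB (FO : List (String × Int)) (pre : PySem.Dict String (List Int)) (ps : List Char) (top bot : Int) : Int :=
  match ps with
  | [] => bot - top + 1
  | sym :: rest =>
    let p := (PySem.Dict.get? pre (String.ofList [sym])).getD []  -- key is present: sym ∈ pattern
    let cTop := (PySem.List.pyGet? p top).getD 0                  -- index in range under Pre_
    let cBot := (PySem.List.pyGet? p (bot + 1)).getD 0
    if cTop == cBot then 0
    else
      let first := (PySem.Dict.get? (PySem.Dict.mk FO) (String.ofList [sym])).getD 0  -- key present under Pre_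
      BWgoB FO pre rest (first + cTop) (first + cBot - 1)

def BetterBWMatching_alt (FirstOccurrence : List (String × Int)) (lastCol : List (Int × String)) (pattern : String) : Int :=
  -- prefix = {s: _prefix_counts(lastCol, s) for s in dict.fromkeys(pattern)}
  let pre := (PySem.Set.ofList pattern.toList).foldl
      (fun d c => PySem.Dict.insert d (String.ofList [c]) (pyPrefixCounts lastCol (String.ofList [c])))
      PySem.Dict.empty
  BWgoB FirstOccurrence pre pattern.toList.reverse 0 ((lastCol.length : Int) - 1)

-- ===== PRECONDITION & SPEC =====
-- Pre_ excludes inputs where A returns no int (empty lastCol, a backward-search window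
-- leaving the column, KeyError on FirstOccurrence), and the corner where a relevant pattern
-- symbol occurs INSIDE a multi-character lastCol entry — there A's substring count of the
-- joined column disagrees with its own per-row equality test, a corner outside the BWT data
-- model where neither behaviour is specified.  Concretely: lastCol is non-empty, and for
-- every pattern character scanned from the right up to the first one absent from the column
-- (later characters are never reached: the search already returns 0), each row's string
-- contains that character exactly when it IS that one-character string, and FirstOccurrence
-- maps it to a non-negative index v with v + (its occurrence count) ≤ len(lastCol).
def Pre_BetterBWMatching (FirstOccurrence : List (String × Int)) (lastCol : List (Int × String)) (pattern : String) : Prop :=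
  lastCol ≠ [] ∧
  ((pattern.toList.reverse.takeWhile
      (fun c => !(lastCol.countP (fun q => q.2 == String.ofList [c]) == 0))).all (fun c =>
    (lastCol.all (fun q => q.2.toList.count c == (if q.2 == String.ofList [c] then 1 else 0))) &&
    (match PySem.Dict.get? (PySem.Dict.mk FirstOccurrence) (String.ofList [c]) with
     | some v => decide (0 ≤ v) &&
         decide (v + (lastCol.countP (fun q => q.2 == String.ofList [c]) : Int) ≤ (lastCol.length : Int))
     | none => false)) = true)

instance (FirstOccurrence : List (String × Int)) (lastCol : List (Int × String)) (pattern : String) : Decidable (Pre_BetterBWMatching FirstOccurrence lastCol pattern) := by unfold Pre_BetterBWMatching; infer_instance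

def pvWitness_BetterBWMatching : (List (String × Int)) × (List (Int × String)) × String :=
  ([("$", 0), ("a", 1)], [((0 : Int), "a"), ((1 : Int), "$")], "a")

def Spec_BetterBWMatching (FirstOccurrence : List (String × Int)) (lastCol : List (Int × String)) (pattern : String) (out : Int) : Prop := out = BetterBWMatching_alt FirstOccurrence lastCol pattern
instance (FirstOccurrence : List (String × Int)) (lastCol : List (Int × String)) (pattern : String) (out : Int) : Decidable (Spec_BetterBWMatching FirstOccurrence lastCol pattern out) := by unfold Spec_BetterBWMatching; infer_instance

-- ===== CLAIM (what is proved, stated in full; the proofs are below) =====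
def Claim_equal_BetterBWMatching : Prop := ∀ (FirstOccurrence : List (String × Int)) (lastCol : List (Int × String)) (pattern : String), Dom_BetterBWMatching FirstOccurrence lastCol pattern → Pre_BetterBWMatching FirstOccurrence lastCol pattern → Spec_BetterBWMatching FirstOccurrence lastCol pattern (BetterBWMatching FirstOccurrence lastCol pattern)

-- ===== LEMMAS AND PROOFS =====

-- Python's str.count with a single-character needle is List.count
theorem charsCountGo_single (c : Char) : ∀ (cs : List Char) (fuel acc : Nat), cs.length ≤ fuel →
    PySem.Chars.count.go [c] fuel cs acc = acc + cs.count c := by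
  intro cs
  induction cs with
  | nil => intro fuel acc h; rw [PySem.Chars.count.go.eq_def]; cases fuel <;> simp
  | cons h t ih =>
    intro fuel acc hf
    cases fuel with
    | zero => simp at hf
    | succ f =>
      rw [PySem.Chars.count.go.eq_def]
      dsimp only
      simp only [List.length_cons] at hf
      by_cases hch : (c == h) = true
      · have he : c = h := beq_iff_eq.mp hch
        subst he
        rw [if_pos (by simp [List.isPrefixOf])]
        simp only [List.length_singleton, List.drop_succ_cons, List.drop_zero]
        rw [ih f (acc + 1) (by omega), List.count_cons]
        simp; omega
      · rw [if_neg (by simp [List.isPrefixOf]; intro he; exact absurd (by simp [he]) hch)]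
        rw [ih f acc (by omega), List.count_cons]
        have hhc : (h == c) = false := by
          rw [beq_eq_false_iff_ne]; intro he; exact hch (by simp [he])
        rw [hhc]
        simp

theorem charsCount_single (cs : List Char) (c : Char) :
    PySem.Chars.count cs [c] = cs.count c := by
  rw [PySem.Chars.count]
  simp [charsCountGo_single c cs cs.length 0 (le_refl _)]

theorem joinNil_cons (x : List Char) (xs : List (List Char)) :
    PySem.Chars.join [] (x :: xs) = x ++ PySem.Chars.join [] xs := by
  cases xs with
  | nil => simp [PySem.Chars.join, List.intercalate]
  | cons y ys => rw [PySem.Chars.join_cons_cons]; simp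

theorem joinCount (c : Char) : ∀ (ss : List String),
    (∀ s ∈ ss, s.toList.count c = if s = String.ofList [c] then 1 else 0) →
    (PySem.Chars.join [] (ss.map String.toList)).count c
      = ss.countP (fun s => s == String.ofList [c]) := by
  intro ss
  induction ss with
  | nil => intro _; simp [PySem.Chars.join_nil]
  | cons s rest ih =>
    intro h
    rw [List.map_cons, joinNil_cons, List.count_append, List.countP_cons,
      ih (fun t ht => h t (List.mem_cons_of_mem _ ht)), h s List.mem_cons_self]
    by_cases hs : s = String.ofList [c] <;> (simp [hs]; try omega)

-- A's CountSymbol, under the per-row consistency of Pre_, is the equality count of a prefix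
theorem countSymbol_eq (lastCol : List (Int × String)) (c : Char)
    (hc : ∀ q ∈ lastCol, q.2.toList.count c = (if q.2 = String.ofList [c] then 1 else 0))
    (k : Nat) :
    CountSymbol (k : Int) lastCol (String.ofList [c])
      = ((lastCol.take k).countP (fun q => q.2 == String.ofList [c]) : Int) := by
  unfold CountSymbol
  rw [PySem.List.slice_to_natCast, PySem.Str.count_eq, PySem.Str.toList_join]
  have : (String.ofList [c]).toList = [c] := by simp
  rw [this]
  rw [show ("" : String).toList = ([] : List Char) from rfl]
  rw [charsCount_single, joinCount c _
    (fun s hs => by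
      obtain ⟨q, hq, rfl⟩ := List.mem_map.mp hs
      exact hc q (List.take_subset _ _ hq))]
  rw [List.countP_map]
  rfl

-- pure form of B's _prefix_counts loop
def pcAux (s : String) : List (Int × String) → Int → List Int
  | [], _ => []
  | q :: rest, acc =>
    let acc' := if q.2 == s then acc + 1 else acc
    acc' :: pcAux s rest acc'

theorem ppc_foldl (s : String) : ∀ (l : List (Int × String)) (out : List Int) (acc : Int),
    (l.foldl (fun (st : List Int × Int) p =>
      let a := if p.2 == s then st.2 + 1 else st.2
      (st.1 ++ [a], a)) (out, acc)).1 = out ++ pcAux s l acc := by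
  intro l
  induction l with
  | nil => intro out acc; simp [pcAux]
  | cons q rest ih =>
    intro out acc
    simp only [List.foldl_cons, pcAux]
    rw [ih]
    simp

theorem pcAux_get (s : String) : ∀ (l : List (Int × String)) (acc : Int) (k : Nat), k < l.length →
    (pcAux s l acc)[k]? = some (acc + ((l.take (k+1)).countP (fun q => q.2 == s) : Int)) := by
  intro l
  induction l with
  | nil => intro acc k h; simp at h
  | cons q rest ih =>
    intro acc k hk
    cases k with
    | zero =>
      simp only [pcAux, List.getElem?_cons_zero, List.take_succ_cons, List.take_zero,
        List.countP_cons, List.countP_nil]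
      by_cases hq : q.2 == s <;> simp [hq]
    | succ k =>
      simp only [pcAux, List.getElem?_cons_succ]
      rw [ih _ k (by simpa using hk)]
      simp only [List.take_succ_cons, List.countP_cons]
      by_cases hq : q.2 == s <;> (simp [hq]; try ring)

theorem pyPrefixCounts_eq (lastCol : List (Int × String)) (s : String) :
    pyPrefixCounts lastCol s = 0 :: pcAux s lastCol 0 := by
  unfold pyPrefixCounts
  rw [ppc_foldl]
  rfl

theorem pyPrefixCounts_get (lastCol : List (Int × String)) (s : String)
    (j : Nat) (hj : j ≤ lastCol.length) :
    (pyPrefixCounts lastCol s)[j]? = some (((lastCol.take j).countP (fun q => q.2 == s) : Int)) := by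
  rw [pyPrefixCounts_eq]
  cases j with
  | zero => simp
  | succ k =>
    rw [List.getElem?_cons_succ, pcAux_get s lastCol 0 k (by omega)]
    simp

-- the two loops agree under the invariant 0 ≤ top ≤ bot < |lastCol|
theorem loop_eq (FO : List (String × Int)) (lastCol : List (Int × String))
    (pre : PySem.Dict String (List Int)) :
    ∀ (ps : List Char) (top bot : Int),
    (∀ c ∈ ps, PySem.Dict.get? pre (String.ofList [c]) = some (pyPrefixCounts lastCol (String.ofList [c]))) →
    (∀ c ∈ ps.takeWhile (fun c => !(lastCol.countP (fun q => q.2 == String.ofList [c]) == 0)),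
      (∀ q ∈ lastCol, q.2.toList.count c = (if q.2 = String.ofList [c] then 1 else 0)) ∧
      ((PySem.Dict.get? (PySem.Dict.mk FO) (String.ofList [c])).isSome = true ∧
       0 ≤ (PySem.Dict.get? (PySem.Dict.mk FO) (String.ofList [c])).getD 0 ∧
       (PySem.Dict.get? (PySem.Dict.mk FO) (String.ofList [c])).getD 0
         + (lastCol.countP (fun q => q.2 == String.ofList [c]) : Int) ≤ (lastCol.length : Int))) →
    0 ≤ top → top ≤ bot → bot + 1 ≤ (lastCol.length : Int) →
    BWgoA FO lastCol ps top bot = BWgoB FO pre ps top bot := by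
  intro ps
  induction ps with
  | nil =>
    intro top bot _ _ h0 htb hbn
    rw [BWgoA, BWgoB, if_pos htb]
  | cons sym rest ih =>
    intro top bot hpre hok h0 htb hbn
    set symS := String.ofList [sym] with hsymS
    obtain ⟨tn, rfl⟩ : ∃ tn : Nat, top = (tn : Int) := ⟨top.toNat, (Int.toNat_of_nonneg h0).symm⟩
    obtain ⟨bn, hbn1⟩ : ∃ bn : Nat, bot + 1 = (bn : Int) :=
      ⟨(bot + 1).toNat, (Int.toNat_of_nonneg (by omega)).symm⟩
    have htnbn : tn < bn := by omega
    have hbnn : bn ≤ lastCol.length := by omega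
    have hwin : PySem.List.slice lastCol (some (tn : Int)) (some (bot + 1))
        = (lastCol.drop tn).take (bn - tn) := by
      rw [hbn1, PySem.List.slice_natCast]
    have hsplit : (lastCol.take bn).countP (fun q => q.2 == symS)
        = (lastCol.take tn).countP (fun q => q.2 == symS)
          + ((lastCol.drop tn).take (bn - tn)).countP (fun q => q.2 == symS) := by
      have : lastCol.take bn = lastCol.take tn ++ (lastCol.drop tn).take (bn - tn) := by
        rw [← List.take_add]
        congr 1
        omega
      rw [this, List.countP_append]
    have hget : PySem.Dict.get? pre symS = some (pyPrefixCounts lastCol symS) :=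
      hpre sym List.mem_cons_self
    have hTop : (PySem.List.pyGet? (pyPrefixCounts lastCol symS) (tn : Int)).getD 0
        = ((lastCol.take tn).countP (fun q => q.2 == symS) : Int) := by
      rw [PySem.List.pyGet?_natCast, pyPrefixCounts_get _ _ tn (by omega)]
      rfl
    have hBot : (PySem.List.pyGet? (pyPrefixCounts lastCol symS) (bot + 1)).getD 0
        = ((lastCol.take bn).countP (fun q => q.2 == symS) : Int) := by
      rw [hbn1, PySem.List.pyGet?_natCast, pyPrefixCounts_get _ _ bn (by omega)]
      rfl
    have hflen : ((PySem.List.slice lastCol (some (tn : Int)) (some (bot + 1))).filter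
        (fun p => p.2 == symS)).length
        = ((lastCol.drop tn).take (bn - tn)).countP (fun q => q.2 == symS) := by
      rw [hwin, ← List.countP_eq_length_filter]
    rw [BWgoA, BWgoB, if_pos htb]
    simp only [← hsymS, hget, Option.getD_some, hTop, hBot, hflen]
    by_cases hw : 0 < ((lastCol.drop tn).take (bn - tn)).countP (fun q => q.2 == symS)
    · -- non-empty window: both descend with the same new (top, bot)
      have hne : (((lastCol.take tn).countP (fun q => q.2 == symS) : Int)
          == ((lastCol.take bn).countP (fun q => q.2 == symS) : Int)) = false := by
        rw [beq_eq_false_iff_ne]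
        intro h
        rw [hsplit] at h
        omega
      have htot : 0 < lastCol.countP (fun q => q.2 == symS) := by
        have hsub : ((lastCol.drop tn).take (bn - tn)).Sublist lastCol :=
          ((lastCol.drop tn).take_sublist _).trans (lastCol.drop_sublist tn)
        have h2 : ((lastCol.drop tn).take (bn - tn)).countP (fun q => q.2 == symS)
            ≤ lastCol.countP (fun q => q.2 == symS) := hsub.countP_le
        omega
      have hpred : (!(lastCol.countP (fun q => q.2 == String.ofList [sym]) == 0)) = true := by
        rw [← hsymS]
        simp only [Bool.not_eq_true', beq_eq_false_iff_ne]
        omega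
      have htw : (sym :: rest).takeWhile
          (fun c => !(lastCol.countP (fun q => q.2 == String.ofList [c]) == 0))
          = sym :: rest.takeWhile (fun c => !(lastCol.countP (fun q => q.2 == String.ofList [c]) == 0)) :=
        List.takeWhile_cons_of_pos hpred
      have hokc := hok sym (by rw [htw]; exact List.mem_cons_self)
      have hc := hokc.1
      rw [← hsymS] at hc
      obtain ⟨hsome, hv0, hvtot⟩ := hokc.2
      rw [← hsymS] at hsome hv0 hvtot
      obtain ⟨v, hv⟩ := Option.isSome_iff_exists.mp hsome
      rw [if_pos hw, hne, if_neg (by simp), hv]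
      simp only [Option.getD_some]
      have hcs1 : CountSymbol (tn : Int) lastCol symS
          = ((lastCol.take tn).countP (fun q => q.2 == symS) : Int) :=
        countSymbol_eq lastCol sym (by rw [hsymS] at hc; exact hc) tn
      have hcs2 : CountSymbol (bot + 1) lastCol symS
          = ((lastCol.take bn).countP (fun q => q.2 == symS) : Int) := by
        rw [hbn1]
        exact countSymbol_eq lastCol sym (by rw [hsymS] at hc; exact hc) bn
      rw [hcs1, hcs2]
      have hle : (lastCol.take bn).countP (fun q => q.2 == symS) ≤ lastCol.countP (fun q => q.2 == symS) :=
        (lastCol.take_sublist bn).countP_le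
      rw [hv] at hv0 hvtot
      simp only [Option.getD_some] at hv0 hvtot
      exact ih _ _ (fun c hcm => hpre c (List.mem_cons_of_mem _ hcm))
        (fun c hcm => hok c (by rw [htw]; exact List.mem_cons_of_mem _ hcm))
        (by omega) (by rw [hsplit]; push_cast; omega) (by omega)
    · -- empty window: both return 0
      have heq : (((lastCol.take tn).countP (fun q => q.2 == symS) : Int)
          == ((lastCol.take bn).countP (fun q => q.2 == symS) : Int)) = true := by
        rw [beq_iff_eq, hsplit]
        omega
      rw [if_neg hw, heq, if_pos rfl]

-- B's symbol table holds exactly the prefix-count list of each pattern character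
theorem preDict_get (lastCol : List (Int × String)) (pattern : String) (c : Char)
    (hcm : c ∈ pattern.toList) :
    PySem.Dict.get? ((PySem.Set.ofList pattern.toList).foldl
      (fun d c => PySem.Dict.insert d (String.ofList [c]) (pyPrefixCounts lastCol (String.ofList [c])))
      PySem.Dict.empty) (String.ofList [c])
    = some (pyPrefixCounts lastCol (String.ofList [c])) := by
  have hinj : ∀ a b : Char, String.ofList [a] = String.ofList [b] → a = b := by
    intro a b h
    have := congrArg String.toList h
    simpa using this
  have hnodup : ((PySem.Set.ofList pattern.toList).map (fun c => String.ofList [c])).Nodup :=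
    (PySem.Set.nodup_ofList pattern.toList).map_on (fun a _ b _ h => hinj a b h)
  have hitems := PySem.Dict.items_foldl_insert_fresh (PySem.Set.ofList pattern.toList)
    (fun c => String.ofList [c]) (fun c => pyPrefixCounts lastCol (String.ofList [c]))
    PySem.Dict.empty (fun a _ => by simp) hnodup
  apply PySem.Dict.get?_of_mem_items
  · rw [hitems]
    simp only [PySem.Dict.empty, List.nil_append]
    exact List.mem_map.mpr ⟨c, (PySem.Set.mem_ofList _ _).mpr hcm, rfl⟩
  · have := PySem.Dict.nodup_keys_foldl_insert_key (PySem.Set.ofList pattern.toList)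
      (fun c => String.ofList [c]) (fun d c => pyPrefixCounts lastCol (String.ofList [c]))
      PySem.Dict.empty (by simp [PySem.Dict.keys, PySem.Dict.empty])
    exact this

-- unpack the Boolean Pre_ into the hypothesis of loop_eq
theorem pre_unpack (FO : List (String × Int)) (lastCol : List (Int × String)) (pattern : String)
    (h : Pre_BetterBWMatching FO lastCol pattern) (c : Char)
    (hcm : c ∈ pattern.toList.reverse.takeWhile
      (fun c => !(lastCol.countP (fun q => q.2 == String.ofList [c]) == 0))) :
    (∀ q ∈ lastCol, q.2.toList.count c = (if q.2 = String.ofList [c] then 1 else 0)) ∧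
    ((PySem.Dict.get? (PySem.Dict.mk FO) (String.ofList [c])).isSome = true ∧
     0 ≤ (PySem.Dict.get? (PySem.Dict.mk FO) (String.ofList [c])).getD 0 ∧
     (PySem.Dict.get? (PySem.Dict.mk FO) (String.ofList [c])).getD 0
       + (lastCol.countP (fun q => q.2 == String.ofList [c]) : Int) ≤ (lastCol.length : Int)) := by
  obtain ⟨-, hall⟩ := h
  rw [List.all_eq_true] at hall
  have hb := hall c hcm
  rw [Bool.and_eq_true, List.all_eq_true] at hb
  obtain ⟨h1, h2⟩ := hb
  constructor
  · intro q hq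
    have := h1 q hq
    rw [beq_iff_eq] at this
    rw [this]
    by_cases hqs : q.2 = String.ofList [c] <;> simp [hqs]
  · cases hv : PySem.Dict.get? (PySem.Dict.mk FO) (String.ofList [c]) with
    | none => rw [hv] at h2; simp at h2
    | some v =>
      rw [hv] at h2
      rw [Bool.and_eq_true, decide_eq_true_iff, decide_eq_true_iff] at h2
      exact ⟨by simp, by simpa using h2.1, by simpa using h2.2⟩

-- ===== VERDICT (by name: the statement is the Claim_ definition above) =====
theorem BetterBWMatching_spec : Claim_equal_BetterBWMatching := by
  unfold Claim_equal_BetterBWMatching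
  intro FO lastCol pattern _ hpre
  unfold Spec_BetterBWMatching BetterBWMatching BetterBWMatching_alt
  have hne := hpre.1
  have hlen : 1 ≤ (lastCol.length : Int) := by
    cases lastCol with
    | nil => exact absurd rfl hne
    | cons q r => simp
  exact loop_eq FO lastCol _ _ 0 ((lastCol.length : Int) - 1)
    (fun c hcm => preDict_get lastCol pattern c (List.mem_reverse.mp hcm))
    (fun c hcm => pre_unpack FO lastCol pattern hpre c hcm)
    (by omega) (by omega) (by omega)
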